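-- pv_equiv track=rewrite | github.com/colo6299/CS-1.3-Core-Data-Structures | Code/fumple.py | index_sort
-- ===== SOURCE A (Python) =====
-- def index_sort(list_in):
--     associator = []
--     retlist = [[], []]
--     for index, item in enumerate(list_in):
--         associator.append((item, index))
--     associator.sort(key=lambda tpl: tpl[0])
--     for tpl in associator:
--         retlist[0].append(tpl[0])
--         retlist[1].append(tpl[1])
--     return retlist
-- ===== SOURCE B (Python) =====
-- def index_sort(list_in):
--     # Rank-by-counting instead of sorting: each element's output position is the
--     # number of elements strictly smaller, plus earlier equal ones (stable rank);
--     # ranks are computed once, then the pairs are emitted grouped by rank 0..n-1.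
--     pairs = [(item, index) for index, item in enumerate(list_in)]
--
--     def rank(p):
--         value, index = p
--         return sum(1 for (w, j) in pairs
--                    if w < value or (w == value and j < index))
--
--     ranked = [(rank(p), p) for p in pairs]
--     out = [p for r in range(len(pairs)) for (q, p) in ranked if q == r]
--     return [[value for value, _ in out], [index for _, index in out]]
-- ===== Notes on version B (the rewrite author's own statement) =====
-- stated objective: alternative
-- what changed: B does not sort at all: it computes each pair's stable rank (count of lex-smaller (value, index) pairs) and emits the pairs grouped by rank 0..n-1, instead of A's build/sort/unzip of (value, index) pairs; slower asymptotically, genuinely different algorithm.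
import Mathlib
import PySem

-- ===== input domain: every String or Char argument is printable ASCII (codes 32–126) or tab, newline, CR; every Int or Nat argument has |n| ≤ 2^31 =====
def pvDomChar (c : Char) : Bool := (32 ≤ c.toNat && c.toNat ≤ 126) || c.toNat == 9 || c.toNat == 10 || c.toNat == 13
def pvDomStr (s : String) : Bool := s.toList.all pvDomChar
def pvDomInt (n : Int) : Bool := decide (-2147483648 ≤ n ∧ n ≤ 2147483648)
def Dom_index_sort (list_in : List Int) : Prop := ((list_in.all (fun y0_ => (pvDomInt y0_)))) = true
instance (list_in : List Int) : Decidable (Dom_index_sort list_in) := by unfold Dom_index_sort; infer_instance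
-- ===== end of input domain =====

-- B replaces A's sort entirely by a stable rank-by-counting placement (each element's output
-- position is the number of lex-smaller (value, index) pairs); alternative algorithm, same result.


-- ===== PORT A =====
def index_sort (list_in : List Int) : List (List Int) :=
  let associator : List (Int × Int) :=
    (PySem.List.enumerate list_in).foldl (fun acc p => acc ++ [(p.2, p.1)]) []
  let sortedAssoc := PySem.List.sorted associator (fun tpl => tpl.1) false
  let retlist : List Int × List Int :=
    sortedAssoc.foldl (fun r tpl => (r.1 ++ [tpl.1], r.2 ++ [tpl.2])) ([], [])
  [retlist.1, retlist.2]

-- ===== PORT B =====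
-- Python's nested 'def rank(p)': sum(1 for … if cond) is List.countP cond
def pvRank (pairs : List (Int × Int)) (p : Int × Int) : Int :=
  (pairs.countP (fun z => z.1 < p.1 || (z.1 == p.1 && z.2 < p.2)) : Int)

def index_sort_alt (list_in : List Int) : List (List Int) :=
  let pairs := (PySem.List.enumerate list_in).map (fun p => (p.2, p.1))
  let ranked := pairs.map (fun p => (pvRank pairs p, p))
  let out := (PySem.List.pyRange 0 pairs.length 1).flatMap
      (fun r => (ranked.filter (fun qp => qp.1 == r)).map (fun qp => qp.2))
  [out.map (fun p => p.1), out.map (fun p => p.2)]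

-- ===== PRECONDITION & SPEC =====
def Spec_index_sort (list_in : List Int) (out : List (List Int)) : Prop := out = index_sort_alt list_in
instance (list_in : List Int) (out : List (List Int)) : Decidable (Spec_index_sort list_in out) := by unfold Spec_index_sort; infer_instance

-- ===== CLAIM (what is proved, stated in full; the proofs are below) =====
def Claim_equal_index_sort : Prop := ∀ (list_in : List Int), Dom_index_sort list_in → Spec_index_sort list_in (index_sort list_in)

-- ===== LEMMAS AND PROOFS =====

-- the stable order A's sort realises on pairs with strictly increasing second components
-- (stated on the very Bool test B's rank counts)
def pvLex (a b : Int × Int) : Prop :=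
  (a.1 < b.1 || (a.1 == b.1 && a.2 < b.2)) = true

theorem pvLex_iff (a b : Int × Int) :
    pvLex a b ↔ (a.1 < b.1 ∨ (a.1 = b.1 ∧ a.2 < b.2)) := by
  simp [pvLex]

theorem pvLex_trans {a b c : Int × Int} (h1 : pvLex a b) (h2 : pvLex b c) : pvLex a c := by
  rw [pvLex_iff] at *; omega

theorem pvLex_not_self (a : Int × Int) :
    (a.1 < a.1 || (a.1 == a.1 && a.2 < a.2)) = false := by
  simp

theorem pvLex_total {a b : Int × Int} (h : a.2 ≠ b.2) : pvLex a b ∨ pvLex b a := by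
  rw [pvLex_iff, pvLex_iff]; omega

theorem pvLex_antisymm {a b : Int × Int} (h1 : pvLex a b) (h2 : pvLex b a) : a = b := by
  rw [pvLex_iff] at *
  have : a.1 = b.1 ∧ a.2 = b.2 := by omega
  exact Prod.ext this.1 this.2

-- insertion keyed by fst keeps the lex order when the new element's index dominates
theorem pairwise_insertBy (x : Int × Int) (acc : List (Int × Int))
    (h1 : acc.Pairwise pvLex) (h2 : ∀ a ∈ acc, a.2 < x.2) :
    (PySem.List.insertBy (fun a b => decide (a.1 < b.1)) x acc).Pairwise pvLex := by
  induction acc with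
  | nil => simp [PySem.List.insertBy]
  | cons y ys ih =>
    rw [List.pairwise_cons] at h1
    simp only [PySem.List.insertBy]
    split
    · rename_i hlt
      rw [decide_eq_true_iff] at hlt
      refine List.pairwise_cons.mpr ⟨?_, List.pairwise_cons.mpr h1⟩
      intro b hb
      rcases List.mem_cons.mp hb with rfl | hb
      · exact (pvLex_iff x b).mpr (Or.inl hlt)
      · rcases (pvLex_iff y b).mp (h1.1 b hb) with h | ⟨he, _⟩
        · exact (pvLex_iff x b).mpr (Or.inl (lt_trans hlt h))
        · exact (pvLex_iff x b).mpr (Or.inl (he ▸ hlt))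
    · rename_i hnlt
      rw [decide_eq_true_iff] at hnlt
      refine List.pairwise_cons.mpr ⟨?_, ih h1.2 (fun a ha => h2 a (List.mem_cons_of_mem y ha))⟩
      intro b hb
      rcases (PySem.List.mem_insertBy _ x b ys).mp hb with rfl | hb
      · rcases lt_or_eq_of_le (le_of_not_gt hnlt) with h | h
        · exact (pvLex_iff y b).mpr (Or.inl h)
        · exact (pvLex_iff y b).mpr (Or.inr ⟨h, h2 y List.mem_cons_self⟩)
      · exact h1.1 b hb

theorem foldl_insertBy_pairwise (xs : List (Int × Int)) (acc : List (Int × Int))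
    (h1 : acc.Pairwise pvLex) (h2 : ∀ a ∈ acc, ∀ b ∈ xs, a.2 < b.2)
    (h3 : xs.Pairwise (fun a b => a.2 < b.2)) :
    (xs.foldl (fun acc x => PySem.List.insertBy (fun a b => decide (a.1 < b.1)) x acc) acc).Pairwise pvLex := by
  induction xs generalizing acc with
  | nil => exact h1
  | cons x xs ih =>
    rw [List.pairwise_cons] at h3
    refine ih _ (pairwise_insertBy x acc h1 (fun a ha => h2 a ha x List.mem_cons_self)) ?_ h3.2
    intro a ha b hb
    rcases (PySem.List.mem_insertBy _ x a acc).mp ha with rfl | ha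
    · exact h3.1 b hb
    · exact h2 a ha b (List.mem_cons_of_mem x hb)

theorem sorted_pairwise_lex (xs : List (Int × Int))
    (h : xs.Pairwise (fun a b => a.2 < b.2)) :
    (PySem.List.sorted xs (fun tpl => tpl.1) false).Pairwise pvLex := by
  rw [PySem.List.sorted_eq_foldl_insertBy]
  exact foldl_insertBy_pairwise xs [] (by simp) (by simp) h

-- a strict counting lemma: q holds somewhere p does not
theorem countP_lt {α : Type} (l : List α) (p q : α → Bool) (x : α)
    (hx : x ∈ l) (hq : q x = true) (hp : p x = false)
    (himp : ∀ z ∈ l, p z = true → q z = true) : l.countP p < l.countP q := by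
  induction l with
  | nil => cases hx
  | cons y ys ih =>
    rcases List.mem_cons.mp hx with rfl | hx
    · rw [List.countP_cons, List.countP_cons, hp, hq]
      have := List.countP_mono_left (l := ys) (p := p) (q := q)
        (fun z hz => himp z (List.mem_cons_of_mem x hz))
      simp only [if_true, Bool.false_eq_true, if_false]
      omega
    · rw [List.countP_cons, List.countP_cons]
      have hy : (if p y = true then 1 else 0) ≤ (if q y = true then 1 else 0) := by
        by_cases h : p y = true
        · rw [if_pos h, if_pos (himp y List.mem_cons_self h)]
        · rw [if_neg h]; omega
      have := ih hx (fun z hz hpz => himp z (List.mem_cons_of_mem y hz) hpz)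
      omega

-- rank is a strictly monotone map from the pairs into their positions
theorem rank_strict_mono (l : List (Int × Int)) (p q : Int × Int)
    (hp : p ∈ l) (h : pvLex p q) :
    l.countP (fun z => z.1 < p.1 || (z.1 == p.1 && z.2 < p.2))
      < l.countP (fun z => z.1 < q.1 || (z.1 == q.1 && z.2 < q.2)) := by
  refine countP_lt l _ _ p hp h (pvLex_not_self p) ?_
  intro z _ hz
  exact pvLex_trans (a := z) (b := p) (c := q) hz h

theorem rank_lt_length (l : List (Int × Int)) (p : Int × Int) (hp : p ∈ l) :
    l.countP (fun z => z.1 < p.1 || (z.1 == p.1 && z.2 < p.2)) < l.length := by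
  have := countP_lt l (fun z => z.1 < p.1 || (z.1 == p.1 && z.2 < p.2)) (fun _ => true) p hp rfl
    (pvLex_not_self p) (fun z _ _ => rfl)
  simpa using this

-- distinct members of a snd-increasing list have distinct snd
theorem snd_ne_of_mem (l : List (Int × Int)) (h : l.Pairwise (fun a b => a.2 < b.2))
    {x y : Int × Int} (hx : x ∈ l) (hy : y ∈ l) (hne : x ≠ y) : x.2 ≠ y.2 := by
  have h' : l.Pairwise (fun a b : Int × Int => a.2 ≠ b.2) := h.imp (fun hab => ne_of_lt hab)
  exact List.Pairwise.forall (fun a b hab => hab.symm) h' hx hy hne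

theorem nodup_of_snd_lt (l : List (Int × Int)) (h : l.Pairwise (fun a b => a.2 < b.2)) :
    l.Nodup := by
  exact (h.imp (fun hab => ne_of_lt hab)).imp (fun hab => by
    intro he; exact hab (congrArg Prod.snd he))

theorem pvRank_mem_filter {l : List (Int × Int)} {r : Int} {a : Int × Int}
    (ha : a ∈ l.filter (fun p => pvRank l p == r)) :
    a ∈ l ∧ (l.countP (fun z => z.1 < a.1 || (z.1 == a.1 && z.2 < a.2)) : Int) = r := by
  have h := List.mem_filter.mp ha
  exact ⟨h.1, by simpa [pvRank] using h.2⟩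

-- B's grouped-by-rank concatenation is pairwise lex-ordered
theorem out_pairwise (l : List (Int × Int)) (h : l.Pairwise (fun a b => a.2 < b.2)) :
    ((PySem.List.pyRange 0 l.length 1).flatMap
      (fun r => l.filter (fun p => pvRank l p == r))).Pairwise pvLex := by
  rw [List.pairwise_flatMap]
  constructor
  · intro r _
    have hn : (l.filter (fun p => pvRank l p == r)).Nodup := (nodup_of_snd_lt l h).filter _
    refine List.Pairwise.imp_of_mem ?_ hn
    intro a b ha hb hne
    obtain ⟨ha1, ha2⟩ := pvRank_mem_filter ha
    obtain ⟨hb1, hb2⟩ := pvRank_mem_filter hb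
    rcases pvLex_total (snd_ne_of_mem l h ha1 hb1 hne) with hl | hl
    · exact hl
    · exfalso
      have := rank_strict_mono l b a hb1 hl
      omega
  · refine List.Pairwise.imp ?_ (PySem.List.pairwise_lt_pyRange_one 0 l.length)
    intro r s hrs x hx y hy
    obtain ⟨hx1, hx2⟩ := pvRank_mem_filter hx
    obtain ⟨hy1, hy2⟩ := pvRank_mem_filter hy
    have hne : x ≠ y := by
      intro he; rw [he] at hx2; omega
    rcases pvLex_total (snd_ne_of_mem l h hx1 hy1 hne) with hl | hl
    · exact hl
    · exfalso
      have := rank_strict_mono l y x hy1 hl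
      omega

-- summing an indicator over range(n) picks out the single matching rank
theorem sum_ite_pyRange (n : Nat) (m : Int) (k : Nat) (h0 : 0 ≤ m) (h1 : m < n) :
    (((PySem.List.pyRange 0 n 1).map (fun r => if m == r then k else 0)).sum) = k := by
  induction n with
  | zero => omega
  | succ n ih =>
    rw [show ((n + 1 : Nat) : Int) = (n : Int) + 1 by push_cast; ring,
      PySem.List.pyRange_one_succ_right (by exact_mod_cast Nat.zero_le n)]
    rw [List.map_append, List.sum_append]
    by_cases hm : m = (n : Int)
    · have hz : (((PySem.List.pyRange 0 n 1).map (fun r => if m == r then k else 0)).sum) = 0 := by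
        apply List.sum_eq_zero
        intro x hx
        rcases List.mem_map.mp hx with ⟨r, hr, rfl⟩
        have hmem := (PySem.List.mem_pyRange_one).mp hr
        have hf : (m == r) = false := by simp; omega
        rw [hf]; rfl
      rw [hz]
      simp [hm]
    · have hlt : m < (n : Int) := by
        have : m < (n : Int) + 1 := by exact_mod_cast h1
        omega
      rw [ih hlt]
      simp [hm]

-- B's concatenation is a permutation of the pairs
theorem out_perm (l : List (Int × Int)) :
    ((PySem.List.pyRange 0 l.length 1).flatMap
      (fun r => l.filter (fun p => pvRank l p == r))).Perm l := by
  rw [List.perm_iff_count]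
  intro a
  rw [List.count_flatMap]
  by_cases ha : a ∈ l
  · have hrw : ((PySem.List.pyRange 0 l.length 1).map
        (List.count a ∘ fun r => l.filter (fun p => pvRank l p == r))).sum
        = ((PySem.List.pyRange 0 l.length 1).map
            (fun r => if pvRank l a == r then List.count a l else 0)).sum := by
      congr 1
      apply List.map_congr_left
      intro r _
      by_cases hr : (pvRank l a == r) = true
      · rw [if_pos hr]
        exact List.count_filter hr
      · rw [if_neg (by simpa using hr)]
        apply List.count_eq_zero_of_not_mem
        intro hmem
        exact hr (List.mem_filter.mp hmem).2
    rw [hrw]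
    apply sum_ite_pyRange
    · unfold pvRank; positivity
    · unfold pvRank
      exact_mod_cast rank_lt_length l a ha
  · rw [List.count_eq_zero_of_not_mem ha]
    apply List.sum_eq_zero
    intro x hx
    rcases List.mem_map.mp hx with ⟨r, _, rfl⟩
    exact List.count_eq_zero_of_not_mem (fun hmem => ha (List.mem_filter.mp hmem).1)

-- the heart: A's stable sort IS B's rank-grouped concatenation
theorem sorted_eq_out (l : List (Int × Int)) (h : l.Pairwise (fun a b => a.2 < b.2)) :
    PySem.List.sorted l (fun tpl => tpl.1) false
      = (PySem.List.pyRange 0 l.length 1).flatMap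
          (fun r => l.filter (fun p => pvRank l p == r)) := by
  refine List.Perm.eq_of_pairwise (le := pvLex)
    (fun a b _ _ h1 h2 => pvLex_antisymm h1 h2)
    (sorted_pairwise_lex l h) (out_pairwise l h)
    ((PySem.List.sorted_perm l _ false).trans (out_perm l).symm)

-- the pairs both programs build have strictly increasing indices
theorem pairs_snd_lt (list_in : List Int) :
    ((PySem.List.enumerate list_in).map (fun p => (p.2, p.1))).Pairwise
      (fun a b : Int × Int => a.2 < b.2) := by
  rw [List.pairwise_map]
  have h : (List.map (fun x => x.1) (PySem.List.enumerate list_in 0)).Pairwise (· < ·) := by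
    rw [PySem.List.map_fst_enumerate]
    exact PySem.List.pairwise_lt_pyRange_one 0 _
  rw [List.pairwise_map] at h
  exact h

-- B's precomputed (rank, pair) list filters to the same groups as filtering by rank directly
theorem ranked_filter_eq (l : List (Int × Int)) (r : Int) :
    ((l.map (fun p => (pvRank l p, p))).filter (fun qp => qp.1 == r)).map (fun qp => qp.2)
      = l.filter (fun p => pvRank l p == r) := by
  rw [List.filter_map, List.map_map]
  simp [Function.comp_def]

theorem index_sort_eq_alt (list_in : List Int) :
    index_sort list_in = index_sort_alt list_in := by
  unfold index_sort index_sort_alt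
  simp only [PySem.List.foldl_append_singleton_eq_map (fun p : Int × Int => (p.2, p.1)),
    List.nil_append,
    PySem.List.foldl_prod_mk (fun (s : List Int) (e : Int × Int) => s ++ [e.1])
      (fun (s : List Int) (e : Int × Int) => s ++ [e.2]),
    PySem.List.foldl_append_singleton_eq_map (fun p : Int × Int => p.1),
    PySem.List.foldl_append_singleton_eq_map (fun p : Int × Int => p.2)]
  simp only [ranked_filter_eq]
  rw [sorted_eq_out _ (pairs_snd_lt list_in)]

-- ===== VERDICT (by name: the statement is the Claim_ definition above) =====
theorem index_sort_spec : Claim_equal_index_sort := by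
  intro list_in _
  unfold Spec_index_sort
  exact index_sort_eq_alt list_in
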